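-- pv_equiv track=rewrite | github.com/lebinanee/logslice | logslice/buffer.py | flush_by_field_change
-- ===== SOURCE A (Python) =====
-- from typing import Callable, Iterable, Iterator
--
-- def flush_by_field_change(
--     entries: Iterable[dict],
--     field: str,
--     default: str = "",
-- ) -> Iterator[list[dict]]:
--     """Yield a batch whenever *field* changes value between consecutive entries."""
--     buf: list[dict] = []
--     current_value: object = object()  # sentinel — never matches a real value
--     for entry in entries:
--         value = entry.get(field, default)
--         if buf and value != current_value:
--             yield buf
--             buf = []
--         current_value = value
--         buf.append(entry)
--     if buf:
--         yield buf
-- ===== SOURCE B (Python) =====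
-- def flush_by_field_change(entries, field, default=""):
--     """Yield a batch whenever *field* changes value between consecutive entries.
--
--     Two-pointer span scan: for each batch, find the stop index of the run of
--     equal keys, then slice it out -- no accumulator buffer, no sentinel.
--     """
--     entries = list(entries)
--     n = len(entries)
--     start = 0
--     while start < n:
--         key = entries[start].get(field, default)
--         stop = start + 1
--         while stop < n and entries[stop].get(field, default) == key:
--             stop += 1
--         yield entries[start:stop]
--         start = stop
-- ===== Notes on version B (the rewrite author's own statement) =====
-- stated objective: alternative
-- what changed: Replaces A's accumulate-and-flush buffer with object() sentinel by a two-pointer span scan that finds each run's stop index and slices the batch out directly.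
import Mathlib
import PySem

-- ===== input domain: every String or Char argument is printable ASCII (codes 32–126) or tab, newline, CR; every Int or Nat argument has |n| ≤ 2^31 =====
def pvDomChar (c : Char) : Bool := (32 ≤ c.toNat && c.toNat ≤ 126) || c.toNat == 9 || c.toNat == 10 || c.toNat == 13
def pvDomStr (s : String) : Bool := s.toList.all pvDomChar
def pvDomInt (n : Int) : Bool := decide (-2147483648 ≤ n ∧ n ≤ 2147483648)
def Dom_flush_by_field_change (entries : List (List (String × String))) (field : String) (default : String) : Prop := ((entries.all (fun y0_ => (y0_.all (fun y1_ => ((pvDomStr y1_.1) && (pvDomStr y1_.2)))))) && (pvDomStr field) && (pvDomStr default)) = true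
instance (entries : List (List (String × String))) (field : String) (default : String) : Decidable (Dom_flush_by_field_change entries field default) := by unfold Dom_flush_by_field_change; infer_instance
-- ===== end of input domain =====

-- B replaces A's accumulate-and-flush buffer (with object() sentinel) by a
-- two-pointer span scan that slices each run of equal keys out directly
-- (objective: alternative; A also only mutates its private list copy).


-- shared by both ports: Python's entry.get(field, default) on a dict given as an assoc list
def pvGet (e : List (String × String)) (field default : String) : String :=
  PySem.Dict.getD ⟨e⟩ field default

-- ===== PORT A =====
-- loop body of A: flush buf when it is nonempty and the key changed (the object()
-- sentinel is `none`, which never equals `some value`), then append the entry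
def pvStepA (field default : String)
    (st : List (List (List (String × String))) × List (List (String × String)) × Option String)
    (entry : List (String × String)) :
    List (List (List (String × String))) × List (List (String × String)) × Option String :=
  let value := pvGet entry field default
  let st' := if st.2.1 ≠ [] ∧ some value ≠ st.2.2 then (st.1 ++ [st.2.1], ([] : List (List (String × String))), st.2.2) else st
  (st'.1, st'.2.1 ++ [entry], some value)

def flush_by_field_change (entries : List (List (String × String))) (field : String) (default : String) : List (List (List (String × String))) :=
  let st := entries.foldl (pvStepA field default) ([], [], none)
  if st.2.1 ≠ [] then st.1 ++ [st.2.1] else st.1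

-- ===== PORT B =====
-- Source B's two-pointer scan: the inner `while` advancing `stop` over equal keys is the
-- run `takeWhile`, the slice entries[start:stop] is the emitted batch, and resuming
-- at `start = stop` is the recursion on the dropped suffix.
def flush_by_field_change_alt_go (field default : String) :
    List (List (String × String)) → List (List (List (String × String)))
  | [] => []
  | e :: rest =>
      let key := pvGet e field default
      let run := rest.takeWhile (fun e' => pvGet e' field default == key)
      (e :: run) :: flush_by_field_change_alt_go field default
        (rest.dropWhile (fun e' => pvGet e' field default == key))
termination_by l => l.length
decreasing_by
  simpa using Nat.lt_succ_of_le (List.length_dropWhile_le _ rest)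

def flush_by_field_change_alt (entries : List (List (String × String))) (field : String) (default : String) : List (List (List (String × String))) :=
  flush_by_field_change_alt_go field default entries

-- ===== PRECONDITION & SPEC =====
def Spec_flush_by_field_change (entries : List (List (String × String))) (field : String) (default : String) (out : List (List (List (String × String)))) : Prop := out = flush_by_field_change_alt entries field default
instance (entries : List (List (String × String))) (field : String) (default : String) (out : List (List (List (String × String)))) : Decidable (Spec_flush_by_field_change entries field default out) := by unfold Spec_flush_by_field_change; infer_instance

-- ===== CLAIM (what is proved, stated in full; the proofs are below) =====
def Claim_equal_flush_by_field_change : Prop := ∀ (entries : List (List (String × String))) (field : String) (default : String), Dom_flush_by_field_change entries field default → Spec_flush_by_field_change entries field default (flush_by_field_change entries field default)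

-- ===== LEMMAS AND PROOFS =====

-- invariant of A's loop: with a nonempty buffer whose last-written key is `cur`,
-- finishing the fold over l flushes `buf` extended by the run of `cur`-keyed
-- entries, then continues as B's span recursion on the rest.
theorem pvFoldA_spec (field default : String) (l : List (List (String × String))) :
    ∀ (out : List (List (List (String × String)))) (buf : List (List (String × String)))
      (cur : String), buf ≠ [] →
    (let st := l.foldl (pvStepA field default) (out, buf, some cur)
     if st.2.1 ≠ [] then st.1 ++ [st.2.1] else st.1)
    = out ++ (buf ++ l.takeWhile (fun e => pvGet e field default == cur))
        :: flush_by_field_change_alt_go field default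
             (l.dropWhile (fun e => pvGet e field default == cur)) := by
  induction l with
  | nil =>
      intro out buf cur hbuf
      simp [hbuf, flush_by_field_change_alt_go]
  | cons e t ih =>
      intro out buf cur hbuf
      by_cases hk : pvGet e field default = cur
      · -- same key: the buffer grows, no flush
        have hstep : pvStepA field default (out, buf, some cur) e
            = (out, buf ++ [e], some (pvGet e field default)) := by
          simp [pvStepA, hk]
        simp only [List.foldl_cons, hstep]
        rw [ih out (buf ++ [e]) (pvGet e field default) (by simp)]
        simp [hk]
      · -- key changed: flush buf, start a fresh run at e
        have hstep : pvStepA field default (out, buf, some cur) e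
            = (out ++ [buf], [e], some (pvGet e field default)) := by
          simp [pvStepA, hbuf, hk]
        simp only [List.foldl_cons, hstep]
        rw [ih (out ++ [buf]) [e] (pvGet e field default) (by simp)]
        conv_rhs => rw [flush_by_field_change_alt_go.eq_def]
        simp [hk]

-- ===== VERDICT (by name: the statement is the Claim_ definition above) =====
theorem flush_by_field_change_spec : Claim_equal_flush_by_field_change := by
  intro entries field default _
  unfold Spec_flush_by_field_change flush_by_field_change flush_by_field_change_alt
  cases entries with
  | nil => simp [flush_by_field_change_alt_go]
  | cons e t =>
      have hstep : pvStepA field default ([], [], none) e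
          = ([], [e], some (pvGet e field default)) := by
        simp [pvStepA]
      simp only [List.foldl_cons, hstep]
      rw [pvFoldA_spec field default t [] [e] (pvGet e field default) (by simp)]
      conv_rhs => rw [flush_by_field_change_alt_go.eq_def]
      simp
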